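-- pv_equiv track=rewrite | github.com/E-Conners-Lab/E-University | pyats/tests/test_edge_svi_hsrp.py | _extract_interface_section
-- ===== SOURCE A (Python) =====
-- def _extract_interface_section(output: str, interface_name: str) -> str:
--     """Extract the section of 'show standby' output for a specific interface."""
--     lines = output.split("\n")
--     section_lines = []
--     in_section = False
--
--     for line in lines:
--         if interface_name in line:
--             in_section = True
--         elif in_section and line.strip() and not line.startswith(" "):
--             # New interface section started
--             break
--
--         if in_section:
--             section_lines.append(line)
--
--     return "\n".join(section_lines)
-- ===== SOURCE B (Python) =====
-- def _extract_interface_section(output: str, interface_name: str) -> str: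
--     """Extract the section of 'show standby' output for a specific interface."""
--     lines = output.split("\n")
--     for i, line in enumerate(lines):
--         if interface_name in line:
--             break
--     else:
--         return ""
--     j = len(lines)
--     for k in range(i + 1, len(lines)):
--         l = lines[k]
--         if interface_name not in l and l.strip() and not l.startswith(" "):
--             j = k
--             break
--     return "\n".join(lines[i:j])
-- ===== Notes on version B (the rewrite author's own statement) =====
-- stated objective: alternative
-- what changed: Replaces the single flag-carrying scan (in_section state machine) by an index-based decomposition: find the header line's index, then the first boundary index after it, and return the joined slice between them.
import Mathlib
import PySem

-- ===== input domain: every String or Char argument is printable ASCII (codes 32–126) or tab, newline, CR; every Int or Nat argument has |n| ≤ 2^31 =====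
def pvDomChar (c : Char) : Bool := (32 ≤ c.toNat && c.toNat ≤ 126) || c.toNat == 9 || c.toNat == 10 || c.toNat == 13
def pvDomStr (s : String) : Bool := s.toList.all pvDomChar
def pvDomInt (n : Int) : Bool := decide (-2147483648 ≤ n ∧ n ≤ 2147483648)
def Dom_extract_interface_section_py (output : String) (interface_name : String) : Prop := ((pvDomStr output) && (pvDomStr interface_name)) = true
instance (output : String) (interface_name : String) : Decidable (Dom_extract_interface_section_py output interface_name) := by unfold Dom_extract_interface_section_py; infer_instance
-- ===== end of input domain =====

-- B replaces A's flag-carrying scan by an index-based decomposition (find header index,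
-- find boundary index, join the slice); same cost, different structure (objective: alternative).

-- ===== PORT A =====
-- the for loop with its in_section flag and break, as structural recursion over the lines
def pvGoA (interface_name : String) : List String → Bool → List String
  | [], _ => []
  | l :: ls, inSec =>
    if PySem.Str.isIn interface_name l then
      l :: pvGoA interface_name ls true
    else if inSec && !(PySem.Str.strip l == "") && !(PySem.Str.startswith l " ") then
      []        -- break (line not appended: in_section checked after the elif broke)
    else if inSec then
      l :: pvGoA interface_name ls inSec
    else
      pvGoA interface_name ls inSec

def extract_interface_section_py (output : String) (interface_name : String) : String :=
  PySem.Str.join "\n" (pvGoA interface_name ((PySem.Str.split? output "\n").getD []) false)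

-- ===== PORT B =====
def extract_interface_section_py_alt (output : String) (interface_name : String) : String :=
  let lines := (PySem.Str.split? output "\n").getD []
  match lines.findIdx? (fun l => PySem.Str.isIn interface_name l) with
  | none => ""
  | some i =>
    -- lines[i:j] where j is the first boundary index after i (len(lines) if none)
    let tail := lines.drop i
    match (lines.drop (i+1)).findIdx?
        (fun l => !(PySem.Str.isIn interface_name l) && !(PySem.Str.strip l == "")
                  && !(PySem.Str.startswith l " ")) with
    | none => PySem.Str.join "\n" tail
    | some k => PySem.Str.join "\n" (tail.take (k+1))

-- ===== PRECONDITION & SPEC =====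
def Spec_extract_interface_section_py (output : String) (interface_name : String) (out : String) : Prop := out = extract_interface_section_py_alt output interface_name
instance (output : String) (interface_name : String) (out : String) : Decidable (Spec_extract_interface_section_py output interface_name out) := by unfold Spec_extract_interface_section_py; infer_instance

-- ===== CLAIM (what is proved, stated in full; the proofs are below) =====
def Claim_equal_extract_interface_section_py : Prop := ∀ (output : String) (interface_name : String), Dom_extract_interface_section_py output interface_name → Spec_extract_interface_section_py output interface_name (extract_interface_section_py output interface_name)

-- ===== LEMMAS AND PROOFS =====

-- once inside the section, A copies lines until the first boundary line (exclusive)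
theorem pvGoA_true (name : String) (ls : List String) :
    pvGoA name ls true =
      match ls.findIdx? (fun l => !(PySem.Str.isIn name l) && !(PySem.Str.strip l == "")
                  && !(PySem.Str.startswith l " ")) with
      | none => ls
      | some k => ls.take k := by
  induction ls with
  | nil => simp [pvGoA]
  | cons t ts ih =>
    by_cases h : PySem.Str.isIn name t = true
    · simp only [pvGoA, List.findIdx?_cons, h, Bool.not_true, Bool.false_and, ih,
        Bool.false_eq_true, if_false, if_true]
      cases ts.findIdx? (fun l => !(PySem.Str.isIn name l) && !(PySem.Str.strip l == "")
                  && !(PySem.Str.startswith l " ")) <;> rfl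
    · have h' : PySem.Str.isIn name t = false := by simpa using h
      by_cases hq : (!(PySem.Str.strip t == "") && !(PySem.Str.startswith t " ")) = true
      · simp only [pvGoA, List.findIdx?_cons, h', Bool.not_false, Bool.true_and,
          Bool.false_eq_true, if_false, hq, if_true]
        rfl
      · have hq' : (!(PySem.Str.strip t == "") && !(PySem.Str.startswith t " ")) = false := by
          simpa using hq
        simp only [pvGoA, List.findIdx?_cons, h', Bool.not_false, Bool.true_and,
          Bool.false_eq_true, if_false, hq', ih]
        cases ts.findIdx? (fun l => !(PySem.Str.isIn name l) && !(PySem.Str.strip l == "")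
                  && !(PySem.Str.startswith l " ")) <;> rfl

-- from the initial state, A's result is exactly B's slice of the lines
theorem pvGoA_false (name : String) (lines : List String) :
    pvGoA name lines false =
      match lines.findIdx? (fun l => PySem.Str.isIn name l) with
      | none => []
      | some i =>
        match (lines.drop (i+1)).findIdx?
            (fun l => !(PySem.Str.isIn name l) && !(PySem.Str.strip l == "")
                  && !(PySem.Str.startswith l " ")) with
        | none => lines.drop i
        | some k => (lines.drop i).take (k+1) := by
  induction lines with
  | nil => simp [pvGoA]
  | cons t ts ih =>
    by_cases h : PySem.Str.isIn name t = true
    · simp only [pvGoA, List.findIdx?_cons, h, if_true, pvGoA_true, List.drop_succ_cons,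
        List.drop_zero]
      cases ts.findIdx? (fun l => !(PySem.Str.isIn name l) && !(PySem.Str.strip l == "")
                  && !(PySem.Str.startswith l " ")) <;> rfl
    · have h' : PySem.Str.isIn name t = false := by simpa using h
      simp only [pvGoA, List.findIdx?_cons, h', Bool.false_and, Bool.false_eq_true, if_false, ih]
      cases hf : ts.findIdx? (fun l => PySem.Str.isIn name l) <;> rfl

-- ===== VERDICT (by name: the statement is the Claim_ definition above) =====
theorem extract_interface_section_py_spec : Claim_equal_extract_interface_section_py := by
  intro output name _
  unfold Spec_extract_interface_section_py extract_interface_section_py extract_interface_section_py_alt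
  rw [pvGoA_false]
  cases hf : ((PySem.Str.split? output "\n").getD []).findIdx? (fun l => PySem.Str.isIn name l)
  · simp only [hf]
    rfl
  · rename_i i
    simp only [hf]
    cases ((((PySem.Str.split? output "\n").getD []).drop (i+1)).findIdx?
        (fun l => !(PySem.Str.isIn name l) && !(PySem.Str.strip l == "")
                  && !(PySem.Str.startswith l " "))) <;> rfl
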